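-- pv_equiv track=rewrite | github.com/Jonathana1106/PythonITP | Quices/JonathanGuzmanAraya#3.py | aux
-- ===== SOURCE A (Python) =====
-- def aux(ref, ele, lista, n, nlista): # Se crea la funcion auxiliar
--     if n == len(lista): # Condicion de parada
--         return nlista # Retorna la nueva lista
--     elif ref == lista[n]: # Si la referencia y un elemento de la lista son iguales
--         nlista.append(ref) #'se agrega otro append #
--         nlista.append(ele) # A la lista se le agrega el elemento que queremos
--         return aux(ref, ele, lista, n+1, nlista) # Se hace recursividad de la funcion
--     else:
--         nlista.append(lista[n]) # Se le agrega el elemento de comparacion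
--         return aux(ref, ele, lista, n+1, nlista) # Llamada recursiva de si misma
-- ===== SOURCE B (Python) =====
-- def aux(ref, ele, lista, n, nlista):
--     # Iterate over the index range instead of recursing; same in-place
--     # mutation of nlista, same element-by-element negative-index lookup.
--     for i in range(n, len(lista)):
--         x = lista[i]
--         if x == ref:
--             nlista.append(ref)
--             nlista.append(ele)
--         else:
--             nlista.append(x)
--     return nlista
-- ===== Notes on version B (the rewrite author's own statement) =====
-- stated objective: simpler
-- what changed: Replaces the tail recursion over (n, nlista) with a for-loop over range(n, len(lista)) folding appends into the same accumulator; O(1) Python stack instead of one frame per element.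
import Mathlib
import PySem

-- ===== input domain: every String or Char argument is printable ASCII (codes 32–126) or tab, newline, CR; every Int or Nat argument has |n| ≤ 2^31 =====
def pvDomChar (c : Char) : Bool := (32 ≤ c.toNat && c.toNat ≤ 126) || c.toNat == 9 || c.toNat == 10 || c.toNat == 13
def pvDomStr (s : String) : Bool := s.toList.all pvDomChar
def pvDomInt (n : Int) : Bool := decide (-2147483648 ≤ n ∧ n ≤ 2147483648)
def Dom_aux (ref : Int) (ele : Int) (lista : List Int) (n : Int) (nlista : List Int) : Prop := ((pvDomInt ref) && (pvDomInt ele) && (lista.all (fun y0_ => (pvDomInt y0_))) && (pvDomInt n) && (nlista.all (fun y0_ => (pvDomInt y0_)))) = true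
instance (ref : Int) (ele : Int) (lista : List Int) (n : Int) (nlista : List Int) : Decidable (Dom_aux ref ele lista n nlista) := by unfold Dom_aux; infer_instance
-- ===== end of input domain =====

-- B replaces A's tail recursion by a for-loop over range(n, len(lista)) folding
-- appends into the same accumulator (objective: simpler, O(1) Python stack).
-- Both A and B mutate `nlista` in place in the same way; the equivalence proved
-- is about the return value (which is that same mutated list).

-- termination helper for port A: a successful lista[n] access means n < len(lista)
theorem pyGet?_some_lt {α : Type} {xs : List α} {i : Int} {x : α}
    (h : PySem.List.pyGet? xs i = some x) : i < (xs.length : Int) := by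
  by_contra hlt
  have hn : PySem.List.pyGet? xs i = none := by
    rw [PySem.List.pyGet?_eq_none_iff]
    intro hr
    simp [PySem.Raise.InRange] at hr
    omega
  simp [hn] at h

-- ===== PORT A =====
def aux (ref : Int) (ele : Int) (lista : List Int) (n : Int) (nlista : List Int) : List Int :=
  if n = (lista.length : Int) then
    nlista
  else
    match h : PySem.List.pyGet? lista n with
    | none => nlista  -- lista[n] raises IndexError in Python; excluded by Pre_aux
    | some v =>
      if ref = v then
        aux ref ele lista (n + 1) ((nlista ++ [ref]) ++ [ele])
      else
        aux ref ele lista (n + 1) (nlista ++ [v])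
termination_by (lista.length - n).toNat
decreasing_by
  · have := pyGet?_some_lt h; omega
  · have := pyGet?_some_lt h; omega

-- ===== PORT B =====
def aux_alt (ref : Int) (ele : Int) (lista : List Int) (n : Int) (nlista : List Int) : List Int :=
  -- for i in range(n, len(lista)): x = lista[i]; append ref,ele on match else x
  (PySem.List.pyRange n (lista.length : Int) 1).foldl
    (fun acc i =>
      match PySem.List.pyGet? lista i with
      | none => acc  -- lista[i] raises IndexError in Python; excluded by Pre_aux
      | some x => if x = ref then (acc ++ [ref]) ++ [ele] else acc ++ [x])
    nlista

-- ===== PRECONDITION & SPEC =====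
-- Pre_aux: exactly the inputs on which Python A returns; outside it A's first
-- lista[n] is out of range (n < -len) or n runs past len (n > len): IndexError.
def Pre_aux (ref : Int) (ele : Int) (lista : List Int) (n : Int) (nlista : List Int) : Prop :=
  -(lista.length : Int) ≤ n ∧ n ≤ (lista.length : Int)
instance (ref : Int) (ele : Int) (lista : List Int) (n : Int) (nlista : List Int) : Decidable (Pre_aux ref ele lista n nlista) := by unfold Pre_aux; infer_instance

def pvWitness_aux : Int × Int × List Int × Int × List Int := (2, 9, [1, 2, 3, 2], 0, [])

def Spec_aux (ref : Int) (ele : Int) (lista : List Int) (n : Int) (nlista : List Int) (out : List Int) : Prop := out = aux_alt ref ele lista n nlista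
instance (ref : Int) (ele : Int) (lista : List Int) (n : Int) (nlista : List Int) (out : List Int) : Decidable (Spec_aux ref ele lista n nlista out) := by unfold Spec_aux; infer_instance

-- ===== CLAIM (what is proved, stated in full; the proofs are below) =====
def Claim_equal_aux : Prop := ∀ (ref : Int) (ele : Int) (lista : List Int) (n : Int) (nlista : List Int), Dom_aux ref ele lista n nlista → Pre_aux ref ele lista n nlista → Spec_aux ref ele lista n nlista (aux ref ele lista n nlista)

-- ===== LEMMAS AND PROOFS =====

theorem pyGet?_some_bounds {α : Type} {xs : List α} {i : Int} {x : α}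
    (h : PySem.List.pyGet? xs i = some x) : -(xs.length : Int) ≤ i ∧ i < (xs.length : Int) := by
  by_contra hlt
  have hn : PySem.List.pyGet? xs i = none := by
    rw [PySem.List.pyGet?_eq_none_iff]
    intro hr
    simp [PySem.Raise.InRange] at hr
    omega
  simp [hn] at h

theorem alt_step (ref : Int) (ele : Int) (lista : List Int) (n : Int) (nlista : List Int)
    {v : Int} (hget : PySem.List.pyGet? lista n = some v) (hlt : n < (lista.length : Int)) :
    aux_alt ref ele lista n nlista =
      aux_alt ref ele lista (n + 1)
        (if v = ref then (nlista ++ [ref]) ++ [ele] else nlista ++ [v]) := by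
  unfold aux_alt
  rw [PySem.List.pyRange_one_cons (by omega), List.foldl_cons, hget]

theorem aux_eq_alt (ref : Int) (ele : Int) (lista : List Int) (n : Int) (nlista : List Int)
    (hp : -(lista.length : Int) ≤ n ∧ n ≤ (lista.length : Int)) :
    aux ref ele lista n nlista = aux_alt ref ele lista n nlista := by
  fun_induction aux ref ele lista n nlista with
  | case1 nl =>
      unfold aux_alt
      rw [PySem.List.pyRange_one_eq_nil (by omega)]
      rfl
  | case2 n nlista hne hget =>
      exfalso
      rw [PySem.List.pyGet?_eq_none_iff] at hget
      exact hget (by simp [PySem.Raise.InRange]; omega)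
  | case3 n nlista hne hget ih =>
      have hb := pyGet?_some_bounds hget
      rw [ih ⟨by omega, by omega⟩, alt_step ref ele lista n nlista hget (by omega), if_pos rfl]
  | case4 n nlista hne v hget hv ih =>
      have hb := pyGet?_some_bounds hget
      rw [ih ⟨by omega, by omega⟩, alt_step ref ele lista n nlista hget (by omega),
        if_neg (fun hh => hv hh.symm)]

-- ===== VERDICT (by name: the statements are the Claim_ definitions above) =====
theorem aux_spec : Claim_equal_aux := by
  intro ref ele lista n nlista _ hp
  exact aux_eq_alt ref ele lista n nlista hp
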